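-- pv_equiv track=rewrite | github.com/dtang04/advent_of_code_2025 | day2/day2.py | checkRepeat_p2
-- ===== SOURCE A (Python) =====
-- def checkRepeat_p2(num):
--     stri = str(num)
--     for chunk_size in range(1, len(stri)):
--         if len(stri) % chunk_size != 0:
--             continue
--         chunks = []
--         for i in range(0, len(stri), chunk_size):
--             chunks.append(stri[i:i+chunk_size])
--         template = chunks[0]
--         satisfy = True
--         for i in range(1,len(chunks)):
--             if chunks[i] != template:
--                 satisfy = False
--         if satisfy:
--             return True
--     return False
-- ===== SOURCE B (Python) =====
-- def checkRepeat_p2(num):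
--     s = str(num)
--     return s in (s + s)[1:-1]
-- ===== Notes on version B (the rewrite author's own statement) =====
-- stated objective: idiomatic
-- what changed: Replaces the trial-division loop that splits the digit string into chunks and compares them with the standard repeated-substring doubling idiom: s is a repetition of a proper block iff s occurs in (s+s)[1:-1].
import Mathlib
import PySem

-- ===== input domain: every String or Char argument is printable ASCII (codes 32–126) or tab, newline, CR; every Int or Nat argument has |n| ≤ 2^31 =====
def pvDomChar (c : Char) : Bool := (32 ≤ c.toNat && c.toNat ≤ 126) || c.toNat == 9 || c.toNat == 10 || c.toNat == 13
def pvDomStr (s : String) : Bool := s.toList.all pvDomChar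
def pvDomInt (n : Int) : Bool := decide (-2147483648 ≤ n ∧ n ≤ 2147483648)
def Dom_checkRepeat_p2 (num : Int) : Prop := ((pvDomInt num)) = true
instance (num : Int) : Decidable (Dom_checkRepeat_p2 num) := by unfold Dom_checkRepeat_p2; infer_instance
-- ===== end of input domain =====

-- B replaces A's divisor-by-divisor chunk splitting with the idiomatic doubling trick: s is a
-- repetition of a proper block iff s occurs in (s+s)[1:-1]; same return value on every int.

-- ===== PORT A =====
-- 'for chunk_size in range(1, len(stri)):' with an early 'return True' becomes structural
-- recursion over the list of chunk sizes; the chunk-building and satisfy loops are folds.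
def pvLoopA (stri : List Char) : List Int → Bool
  | [] => false
  | c :: rest =>
    if PySem.Int.mod (stri.length : Int) c ≠ 0 then pvLoopA stri rest
    else
      let chunks := (PySem.List.pyRange 0 (stri.length : Int) c).foldl
        (fun acc i => acc ++ [PySem.List.slice stri (some i) (some (i + c))]) []
      -- chunks[0]: in-range whenever this branch runs (len(stri) ≥ 1), so pyGetD is exact here
      let template := PySem.List.pyGetD chunks 0 []
      let satisfy := (PySem.List.pyRange 1 (chunks.length : Int) 1).foldl
        (fun sat i => if PySem.List.pyGetD chunks i [] ≠ template then false else sat) true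
      if satisfy then true else pvLoopA stri rest

def checkRepeat_p2 (num : Int) : Bool :=
  let stri := (PySem.Int.toStr num).toList
  pvLoopA stri (PySem.List.pyRange 1 (stri.length : Int) 1)

-- ===== PORT B =====
def checkRepeat_p2_alt (num : Int) : Bool :=
  let s := (PySem.Int.toStr num).toList
  PySem.Chars.isIn s (PySem.Chars.slice (s ++ s) (some 1) (some (-1)))

-- ===== PRECONDITION & SPEC =====
def Spec_checkRepeat_p2 (num : Int) (out : Bool) : Prop := out = checkRepeat_p2_alt num
instance (num : Int) (out : Bool) : Decidable (Spec_checkRepeat_p2 num out) := by unfold Spec_checkRepeat_p2; infer_instance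

-- ===== CLAIM (what is proved, stated in full; the proofs are below) =====
def Claim_equal_checkRepeat_p2 : Prop := ∀ (num : Int), Dom_checkRepeat_p2 num → Spec_checkRepeat_p2 num (checkRepeat_p2 num)

-- ===== LEMMAS AND PROOFS =====

theorem pvToChars_ne_nil (n : Int) : PySem.Int.toChars n ≠ [] := by
  unfold PySem.Int.toChars
  split
  · simp
  · exact List.ne_nil_of_length_pos Nat.length_toDigits_pos

theorem pvEq_of_len_getD {α : Type} (c : α) {a b : List α} (h : a.length = b.length)
    (hp : ∀ i < b.length, a.getD i c = b.getD i c) : a = b := by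
  apply List.ext_getElem h
  intro i h1 h2
  have := hp i h2
  rwa [List.getD_eq_getElem a c h1, List.getD_eq_getElem b c h2] at this

/-- the string has period pattern `d` chunk-wise: every position agrees with its residue mod `d` -/
def pvPer (l : List Char) (d : Nat) : Prop :=
  ∀ i < l.length, l.getD i 'a' = l.getD (i % d) 'a'

/-- cyclic shift by `k` (taken mod the length, pointwise) fixes the string -/
def pvQ (l : List Char) (k : Nat) : Prop :=
  ∀ j < l.length, l.getD ((j + k) % l.length) 'a' = l.getD j 'a'

/-- rotation by `k` fixes the string -/
def pvRot (l : List Char) (k : Nat) : Prop := l.drop k ++ l.take k = l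

theorem pvQ_len (l : List Char) : pvQ l l.length := by
  intro j hj
  rw [Nat.add_mod_right, Nat.mod_eq_of_lt hj]

theorem pvQ_add (l : List Char) {a b : Nat} (ha : pvQ l a) (hb : pvQ l b) : pvQ l (a + b) := by
  intro j hj
  have hn : 0 < l.length := lt_of_le_of_lt (Nat.zero_le j) hj
  have h1 := hb ((j + a) % l.length) (Nat.mod_lt _ hn)
  have h2 := ha j hj
  calc l.getD ((j + (a + b)) % l.length) 'a'
      = l.getD (((j + a) % l.length + b) % l.length) 'a' := by
        rw [Nat.mod_add_mod, Nat.add_assoc]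
    _ = l.getD ((j + a) % l.length) 'a' := h1
    _ = l.getD j 'a' := h2

theorem pvQ_sub (l : List Char) {a b : Nat} (hab : pvQ l (a + b)) (hb : pvQ l b) : pvQ l a := by
  intro j hj
  have hn : 0 < l.length := lt_of_le_of_lt (Nat.zero_le j) hj
  have h1 := hb ((j + a) % l.length) (Nat.mod_lt _ hn)
  have h2 := hab j hj
  rw [Nat.mod_add_mod, Nat.add_assoc] at h1
  exact h1.symm.trans h2

theorem pvQ_mul (l : List Char) {a : Nat} (ha : pvQ l a) (m : Nat) : pvQ l (m * a) := by
  induction m with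
  | zero => intro j hj; simp [Nat.mod_eq_of_lt hj]
  | succ m ih =>
      have := pvQ_add l ih ha
      simpa [Nat.succ_mul] using this

theorem pvQ_mod (l : List Char) {a b : Nat} (ha : pvQ l a) (hb : pvQ l b) : pvQ l (a % b) := by
  have h1 : pvQ l (a / b * b) := pvQ_mul l hb (a / b)
  have h2 : pvQ l (a % b + a / b * b) := by rwa [Nat.mod_add_div']
  exact pvQ_sub l h2 h1

theorem pvQ_gcd (l : List Char) : ∀ a b : Nat, pvQ l a → pvQ l b → pvQ l (Nat.gcd a b) := by
  intro a b
  induction a, b using Nat.gcd.induction with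
  | H0 n => intro _ hb; simpa using hb
  | H1 m n hm ih =>
      intro ha hb
      rw [Nat.gcd_rec]
      exact ih (pvQ_mod l hb ha) ha

theorem pvPer_of_q (l : List Char) {d : Nat} (hd : 0 < d) (hq : pvQ l d) : pvPer l d := by
  intro i
  induction i using Nat.strong_induction_on with
  | _ i ih =>
    intro hi
    by_cases hc : i < d
    · rw [Nat.mod_eq_of_lt hc]
    · have hge : d ≤ i := le_of_not_gt hc
      have hi' : i - d < l.length := by omega
      have h1 := hq (i - d) hi'
      have he : (i - d + d) % l.length = i := by
        rw [Nat.sub_add_cancel hge, Nat.mod_eq_of_lt hi]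
      rw [he] at h1
      have h2 := ih (i - d) (by omega) hi'
      have hm : (i - d) % d = i % d := by
        conv_rhs => rw [← Nat.sub_add_cancel hge]
        rw [Nat.add_mod_right]
      rw [h1, h2, hm]

theorem pvQ_of_per (l : List Char) {d : Nat} (hdvd : d ∣ l.length) (hper : pvPer l d) :
    pvQ l d := by
  intro j hj
  have hn : 0 < l.length := lt_of_le_of_lt (Nat.zero_le j) hj
  have h1 : (j + d) % l.length < l.length := Nat.mod_lt _ hn
  rw [hper _ h1, hper j hj]
  congr 1
  rw [Nat.mod_mod_of_dvd _ hdvd, Nat.add_mod_right]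

theorem pvAppend_getD (l : List Char) {k i : Nat} (hk : k ≤ l.length) (hi : i < l.length) :
    (l.drop k ++ l.take k).getD i 'a' = l.getD ((i + k) % l.length) 'a' := by
  rcases lt_or_ge i (l.length - k) with hc | hc
  · have e : (i + k) % l.length = k + i := by
      rw [Nat.mod_eq_of_lt (by omega)]; omega
    rw [e]
    simp only [List.getD_eq_getElem?_getD, List.getElem?_append, List.length_drop,
      List.getElem?_drop, List.getElem?_take]
    rw [if_pos hc]
  · have e : (i + k) % l.length = i - (l.length - k) := by
      rw [Nat.mod_eq_sub_mod (by omega), Nat.mod_eq_of_lt (by omega)]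
      omega
    rw [e]
    simp only [List.getD_eq_getElem?_getD, List.getElem?_append, List.length_drop,
      List.getElem?_drop, List.getElem?_take]
    rw [if_neg (by omega), if_pos (by omega)]

theorem pvRot_iff_q (l : List Char) {k : Nat} (hk : k ≤ l.length) : pvRot l k ↔ pvQ l k := by
  constructor
  · intro hr j hj
    rw [← pvAppend_getD l hk hj, hr]
  · intro hq
    apply pvEq_of_len_getD 'a'
    · simp only [List.length_append, List.length_drop, List.length_take]
      omega
    · intro i hi
      rw [pvAppend_getD l hk hi]
      exact hq i hi

-- ---------- B-side characterisation ----------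

theorem pvMid_eq (l : List Char) (h : l ≠ []) :
    PySem.List.slice (l ++ l) (some 1) (some (-1)) =
      ((l ++ l).drop 1).take (2 * l.length - 2) := by
  have hn : 0 < l.length := List.length_pos_of_ne_nil h
  have h1 : PySem.List.clampIdx (l.length + l.length) 1 = 1 := by
    unfold PySem.List.clampIdx
    rw [if_neg (by norm_num)]
    simp only [Int.toNat_one]
    omega
  have h2 : PySem.List.clampIdx (l.length + l.length) (-1) = l.length + l.length - 1 :=
    PySem.List.clampIdx_neg_one _
  simp only [PySem.List.slice, List.length_append, h1, h2]
  congr 1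
  omega

theorem pvDouble_seg (l : List Char) {m : Nat} (hm : m ≤ l.length) :
    ((l ++ l).drop m).take l.length = l.drop m ++ l.take m := by
  apply List.ext_getElem?
  intro i
  simp only [List.getElem?_take, List.getElem?_drop, List.getElem?_append, List.length_drop]
  by_cases hi : i < l.length
  · rw [if_pos hi]
    by_cases hc : i < l.length - m
    · rw [if_pos (by omega), if_pos hc]
    · rw [if_neg (by omega), if_neg hc]
      by_cases hc2 : i - (l.length - m) < m
      · rw [if_pos hc2]
        congr 1
        omega
      · exact absurd hi (by omega)
  · rw [if_neg hi]
    by_cases hc : i < l.length - m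
    · omega
    · rw [if_neg hc, if_neg (by omega)]

theorem pvB_iff (l : List Char) (hne : l ≠ []) :
    PySem.Chars.isIn l (PySem.Chars.slice (l ++ l) (some 1) (some (-1))) = true ↔
      ∃ k, 0 < k ∧ k < l.length ∧ pvRot l k := by
  have hn : 0 < l.length := List.length_pos_of_ne_nil hne
  rw [PySem.Chars.slice_eq_listSlice, pvMid_eq l hne, ← PySem.Chars.exists_prefix_drop_iff_isIn]
  constructor
  · rintro ⟨j, hp⟩
    have e : ((((l ++ l).drop 1).take (2 * l.length - 2)).drop j) =
        ((l ++ l).drop (1 + j)).take (2 * l.length - 2 - j) := by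
      rw [List.drop_take, List.drop_drop]
    rw [e] at hp
    have hlen := hp.length_le
    simp only [List.length_take, List.length_drop, List.length_append] at hlen
    have hj : j + 2 ≤ l.length := by omega
    have hp' : l <+: (l ++ l).drop (1 + j) := hp.trans (List.take_prefix _ _)
    have heq := List.prefix_iff_eq_take.mp hp'
    rw [pvDouble_seg l (by omega)] at heq
    exact ⟨1 + j, by omega, by omega, heq.symm⟩
  · rintro ⟨k, hk0, hkn, hrot⟩
    refine ⟨k - 1, ?_⟩
    have e : ((((l ++ l).drop 1).take (2 * l.length - 2)).drop (k - 1)) =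
        ((l ++ l).drop k).take (2 * l.length - 2 - (k - 1)) := by
      rw [List.drop_take, List.drop_drop]
      have hk : 1 + (k - 1) = k := by omega
      rw [hk]
    rw [e]
    apply List.prefix_take_iff.mpr
    constructor
    · apply List.prefix_iff_eq_take.mpr
      rw [pvDouble_seg l (le_of_lt hkn)]
      exact hrot.symm
    · omega

-- ---------- A-side characterisation ----------

/-- one iteration of A's outer loop, as a Boolean -/
def pvBody (stri : List Char) (c : Int) : Bool :=
  if PySem.Int.mod (stri.length : Int) c ≠ 0 then false
  else
    let chunks := (PySem.List.pyRange 0 (stri.length : Int) c).foldl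
      (fun acc i => acc ++ [PySem.List.slice stri (some i) (some (i + c))]) []
    let template := PySem.List.pyGetD chunks 0 []
    (PySem.List.pyRange 1 (chunks.length : Int) 1).foldl
      (fun sat i => if PySem.List.pyGetD chunks i [] ≠ template then false else sat) true

theorem pvLoopA_cons (stri : List Char) (c : Int) (rest : List Int) :
    pvLoopA stri (c :: rest) = (pvBody stri c || pvLoopA stri rest) := by
  simp only [pvLoopA, pvBody]
  split_ifs with h1 h2
  · rw [Bool.false_or]
  · rw [h2, Bool.true_or]
  · simp only [Bool.not_eq_true] at h2
    rw [h2, Bool.false_or]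

theorem pvLoopA_any (stri : List Char) (cs : List Int) :
    pvLoopA stri cs = cs.any (fun c => pvBody stri c) := by
  induction cs with
  | nil => rfl
  | cons c rest ih => rw [pvLoopA_cons, List.any_cons, ih]

theorem pvFoldl_guard {α : Type} (P : α → Prop) [DecidablePred P] (xs : List α) :
    ∀ init : Bool,
      xs.foldl (fun sat i => if P i then false else sat) init =
        (init && xs.all (fun i => !decide (P i))) := by
  induction xs with
  | nil => intro init; simp
  | cons x xs ih =>
      intro init
      simp only [List.foldl_cons, List.all_cons, ih]
      by_cases h : P x
      · simp [h]
      · simp [h]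

theorem pvRange_step (l : List Char) {d : Nat} (hd : 0 < d) (hdvd : d ∣ l.length) :
    PySem.List.pyRange 0 (l.length : Int) (d : Int) =
      (List.range (l.length / d)).map (fun k => ((d * k : Nat) : Int)) := by
  obtain ⟨m, hm⟩ := hdvd
  have hdm : l.length / d = m := by rw [hm, Nat.mul_div_cancel_left _ hd]
  have hstep : ((d : Int)) ≠ 0 := by exact_mod_cast hd.ne'
  rcases Nat.eq_zero_or_pos l.length with h0 | hlpos
  · have h' : d * m = 0 := by rw [← hm]; exact h0
    have hm0 : m = 0 := by
      rcases Nat.mul_eq_zero.mp h' with h'' | h''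
      · omega
      · exact h''
    unfold PySem.List.pyRange
    rw [if_neg hstep]
    simp [h0, hdm, hm0]
  · have hpos : (0 : Int) < (d : Int) := by exact_mod_cast hd
    have hstart : (0 : Int) < (l.length : Int) := by exact_mod_cast hlpos
    have hcount : (((l.length : Int) - 0 + (d : Int) - 1) / (d : Int)).toNat = l.length / d := by
      rw [hdm]
      have he : ((l.length : Int) - 0 + (d : Int) - 1) = ((d : Int) - 1) + (d : Int) * (m : Int) := by
        rw [hm]; push_cast; ring
      rw [he, Int.add_mul_ediv_left _ _ hstep,
        Int.ediv_eq_zero_of_lt (by omega) (by omega)]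
      simp
    unfold PySem.List.pyRange
    rw [if_neg hstep, if_pos hpos, if_pos hstart, hcount]
    apply List.map_congr_left
    intro k _
    push_cast
    ring

theorem pvChunks_eq (l : List Char) {d : Nat} (hd : 0 < d) (hdvd : d ∣ l.length) :
    (PySem.List.pyRange 0 (l.length : Int) (d : Int)).foldl
        (fun acc i => acc ++ [PySem.List.slice l (some i) (some (i + (d : Int)))]) [] =
      (List.range (l.length / d)).map (fun k => (l.drop (d * k)).take d) := by
  rw [PySem.List.foldl_append_singleton_eq_map, pvRange_step l hd hdvd, List.map_map]
  simp only [List.nil_append]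
  apply List.map_congr_left
  intro k _
  simp only [Function.comp]
  have e : ((d * k : Nat) : Int) + (d : Int) = (((d * k : Nat) : Int) + ((d : Nat) : Int)) := rfl
  rw [e, PySem.List.slice_natCast_add]

theorem pvGetD_map_range {f : Nat → List Char} {m k : Nat} (hk : k < m) :
    ((List.range m).map f).getD k [] = f k := by
  rw [List.getD_eq_getElem _ _ (by simpa using hk)]
  simp

theorem pvChunks_all_iff_per (l : List Char) {d : Nat} (hd : 0 < d) (hdvd : d ∣ l.length)
    (hle : d ≤ l.length) :
    (∀ k, 1 ≤ k → k < l.length / d → (l.drop (d * k)).take d = l.take d) ↔ pvPer l d := by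
  obtain ⟨m, hm⟩ := hdvd
  have hdm : l.length / d = m := by rw [hm, Nat.mul_div_cancel_left _ hd]
  constructor
  · intro h i hi
    have hr : i % d < d := Nat.mod_lt _ hd
    by_cases hk0 : i < d
    · rw [Nat.mod_eq_of_lt hk0]
    · set k := i / d with hkdef
      have hik : d * k + i % d = i := Nat.div_add_mod i d
      have hk1 : 1 ≤ k := by
        rw [hkdef]
        exact (Nat.le_div_iff_mul_le hd).mpr (by omega)
      have hidm : i < d * m := hm ▸ hi
      have hkm : k < m := (Nat.div_lt_iff_lt_mul hd).mpr (by rwa [Nat.mul_comm m d])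
      have heq := h k hk1 (by rw [hdm]; exact hkm)
      have hA : l.getD i 'a' = ((l.drop (d * k)).take d).getD (i % d) 'a' := by
        rw [List.getD_eq_getElem?_getD, List.getD_eq_getElem?_getD, List.getElem?_take,
          if_pos hr, List.getElem?_drop, hik]
      rw [hA, heq, List.getD_eq_getElem?_getD, List.getD_eq_getElem?_getD,
        List.getElem?_take, if_pos hr]
  · intro hper k hk1 hkm
    have hkm' : k < m := by rw [hdm] at hkm; exact hkm
    have hbound : d * k + d ≤ l.length := by
      have : d * (k + 1) ≤ d * m := Nat.mul_le_mul_left d (by omega)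
      rw [hm]
      omega
    apply pvEq_of_len_getD 'a'
    · simp only [List.length_take, List.length_drop]
      omega
    · intro r hr'
      have hr : r < d := by
        simp only [List.length_take] at hr'
        omega
      have hin : d * k + r < l.length := by omega
      have hmod : (d * k + r) % d = r := by
        rw [Nat.mul_add_mod, Nat.mod_eq_of_lt hr]
      have h1 : ((l.drop (d * k)).take d).getD r 'a' = l.getD (d * k + r) 'a' := by
        rw [List.getD_eq_getElem?_getD, List.getD_eq_getElem?_getD, List.getElem?_take,
          if_pos hr, List.getElem?_drop]
      have h2 : (l.take d).getD r 'a' = l.getD r 'a' := by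
        rw [List.getD_eq_getElem?_getD, List.getD_eq_getElem?_getD, List.getElem?_take,
          if_pos hr]
      rw [h1, h2]
      have := hper (d * k + r) hin
      rwa [hmod] at this

theorem pvBody_iff (l : List Char) {c : Int} (h1 : 1 ≤ c) (h2 : c < (l.length : Int)) :
    pvBody l c = true ↔ (c.toNat ∣ l.length ∧ pvPer l c.toNat) := by
  have hc : c = ((c.toNat : Nat) : Int) := by omega
  set d := c.toNat with hddef
  have hd0 : 0 < d := by omega
  have hdn : d < l.length := by omega
  unfold pvBody
  rw [hc]
  by_cases hdvd : d ∣ l.length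
  · have hmod : PySem.Int.mod (l.length : Int) ((d : Nat) : Int) = 0 := by
      rw [PySem.Int.mod_eq_zero_iff_dvd]
      exact_mod_cast hdvd
    rw [if_neg (by simp [hmod])]
    simp only [pvChunks_eq l hd0 hdvd]
    set m := l.length / d with hmdef
    have hm1 : 1 ≤ m := by
      rw [hmdef]
      exact (Nat.le_div_iff_mul_le hd0).mpr (by omega)
    have htempl : PySem.List.pyGetD ((List.range m).map (fun k => (l.drop (d * k)).take d)) 0 []
        = l.take d := by
      have h0 := PySem.List.pyGetD_natCast
        ((List.range m).map (fun k => (l.drop (d * k)).take d)) 0 []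
      rw [show ((0 : Nat) : Int) = (0 : Int) from rfl] at h0
      rw [h0, pvGetD_map_range hm1]
      simp
    rw [htempl,
      pvFoldl_guard (fun i => PySem.List.pyGetD
        ((List.range m).map (fun k => (l.drop (d * k)).take d)) i [] ≠ l.take d),
      List.length_map, List.length_range]
    simp only [Bool.true_and, List.all_eq_true]
    constructor
    · intro h
      refine ⟨hdvd, ?_⟩
      rw [← pvChunks_all_iff_per l hd0 hdvd (le_of_lt hdn)]
      simp only [← hmdef]
      intro k hk1 hkm
      have hmem : ((k : Nat) : Int) ∈ PySem.List.pyRange 1 (m : Int) 1 := by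
        rw [PySem.List.mem_pyRange_one]
        constructor
        · exact_mod_cast hk1
        · exact_mod_cast hkm
      have h' := h _ hmem
      simp only [Bool.not_eq_true', decide_eq_false_iff_not, ne_eq, not_not,
        PySem.List.pyGetD_natCast] at h'
      rw [List.getD_eq_getElem _ _ (by simpa using hkm), List.getElem_map,
        List.getElem_range] at h'
      exact h'
    · rintro ⟨_, hper⟩
      have hall := (pvChunks_all_iff_per l hd0 hdvd (le_of_lt hdn)).mpr hper
      simp only [← hmdef] at hall
      intro i hmem
      rw [PySem.List.mem_pyRange_one] at hmem
      obtain ⟨hi1, him⟩ := hmem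
      have hieq : i = ((i.toNat : Nat) : Int) := by omega
      have hitm : i.toNat < m := by omega
      rw [hieq, PySem.List.pyGetD_natCast, pvGetD_map_range hitm]
      have hch := hall i.toNat (by omega) hitm
      simp [hch]
  · have hmod : PySem.Int.mod (l.length : Int) ((d : Nat) : Int) ≠ 0 := by
      intro hcon
      rw [PySem.Int.mod_eq_zero_iff_dvd] at hcon
      exact hdvd (by exact_mod_cast hcon)
    rw [if_pos (by simpa using hmod)]
    simp [hdvd]

theorem pvA_iff (l : List Char) :
    pvLoopA l (PySem.List.pyRange 1 (l.length : Int) 1) = true ↔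
      ∃ d : Nat, 0 < d ∧ d < l.length ∧ d ∣ l.length ∧ pvPer l d := by
  rw [pvLoopA_any, List.any_eq_true]
  constructor
  · rintro ⟨c, hmem, hbody⟩
    rw [PySem.List.mem_pyRange_one] at hmem
    obtain ⟨h1, h2⟩ := hmem
    have := (pvBody_iff l h1 h2).mp hbody
    exact ⟨c.toNat, by omega, by omega, this.1, this.2⟩
  · rintro ⟨d, hd0, hdn, hdvd, hper⟩
    refine ⟨(d : Int), ?_, ?_⟩
    · rw [PySem.List.mem_pyRange_one]
      constructor <;> [exact_mod_cast hd0; exact_mod_cast hdn]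
    · apply (pvBody_iff l (by exact_mod_cast hd0) (by exact_mod_cast hdn)).mpr
      simpa using ⟨hdvd, hper⟩

-- ===== VERDICT (by name: the statement is the Claim_ definition above) =====
theorem checkRepeat_p2_spec : Claim_equal_checkRepeat_p2 := by
  intro num _
  unfold Spec_checkRepeat_p2
  simp only [checkRepeat_p2, checkRepeat_p2_alt]
  set l := (PySem.Int.toStr num).toList with hl
  have hne : l ≠ [] := by
    rw [hl, PySem.Int.toList_toStr]
    exact pvToChars_ne_nil num
  rw [Bool.eq_iff_iff, pvA_iff l, pvB_iff l hne]
  constructor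
  · rintro ⟨d, hd0, hdn, hdvd, hper⟩
    exact ⟨d, hd0, hdn, (pvRot_iff_q l hdn.le).mpr (pvQ_of_per l hdvd hper)⟩
  · rintro ⟨k, hk0, hkn, hrot⟩
    have hq := (pvRot_iff_q l hkn.le).mp hrot
    have hg := pvQ_gcd l k l.length hq (pvQ_len l)
    have hgpos : 0 < Nat.gcd k l.length := Nat.gcd_pos_of_pos_left _ hk0
    exact ⟨Nat.gcd k l.length, hgpos,
      lt_of_le_of_lt (Nat.gcd_le_left _ hk0) hkn,
      Nat.gcd_dvd_right _ _, pvPer_of_q l hgpos hg⟩
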